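-- pv_equiv track=rewrite | github.com/wymcg/vid2led | util.py | generate_coordinate_table
-- ===== SOURCE A (Python) =====
-- def generate_coordinate_table(width, height, serpentine=False, vertical=False):
--     table = {}
--
--     if not vertical:
--         # the matrix is wired horizontally (ie. every row is sequentially wired)
--         for y in range(0, height):
--             for x in range(0, width):
--                 if not serpentine or (y % 2 == 0):
--                     # normal orientation row (horizontal)
--                     # all rows of non-serpentine matrices are like this
--                     # every other row of serpentine matrices are like this
--                     table[(x, y)] = (y * width) + x
--                 else:
--                     # flipped orientation row (horizontal)
--                     # every other row of serpentine matrices is like this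
--                     table[(x, y)] = (y * width) + (width - x - 1)
--     else:
--         # the matrix is wired vertically (ie. each column is sequentially wired)
--         for x in range(0, width):
--             for y in range(0, height):
--                 if not serpentine or (x % 2 == 0):
--                     # normal orientation column (vertical)
--                     # all columns of non-serpentine matrices are like this
--                     # every other column of serpentine matrices are like this
--                     table[(x, y)] = (x * height) + y
--                 else:
--                     # flipped orientation row (vertical)
--                     # every other column of serpentine matrices are like this
--                     table[(x, y)] = (x * height) + (height - y - 1)
--
--     return table
-- ===== SOURCE B (Python) =====
-- def generate_coordinate_table(width, height, serpentine=False, vertical=False):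
--     # One unified wiring-order pass: enumerate consecutive LED indices per line,
--     # reversing the whole block on flipped lines instead of per-cell arithmetic.
--     outer, inner = (width, height) if vertical else (height, width)
--     table = {}
--     led = 0
--     for o in range(outer):
--         block = list(range(led, led + inner))
--         if serpentine and o % 2 == 1:
--             block.reverse()
--         for i in range(inner):
--             key = (o, i) if vertical else (i, o)
--             table[key] = block[i]
--         led += inner
--     return table
-- ===== Notes on version B (the rewrite author's own statement) =====
-- stated objective: simpler
-- what changed: B replaces A's two duplicated nested loops with per-cell closed-form index arithmetic by one unified pass that enumerates consecutive LED indices per wiring line with a running counter and reverses the whole block on flipped serpentine lines.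
import Mathlib
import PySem

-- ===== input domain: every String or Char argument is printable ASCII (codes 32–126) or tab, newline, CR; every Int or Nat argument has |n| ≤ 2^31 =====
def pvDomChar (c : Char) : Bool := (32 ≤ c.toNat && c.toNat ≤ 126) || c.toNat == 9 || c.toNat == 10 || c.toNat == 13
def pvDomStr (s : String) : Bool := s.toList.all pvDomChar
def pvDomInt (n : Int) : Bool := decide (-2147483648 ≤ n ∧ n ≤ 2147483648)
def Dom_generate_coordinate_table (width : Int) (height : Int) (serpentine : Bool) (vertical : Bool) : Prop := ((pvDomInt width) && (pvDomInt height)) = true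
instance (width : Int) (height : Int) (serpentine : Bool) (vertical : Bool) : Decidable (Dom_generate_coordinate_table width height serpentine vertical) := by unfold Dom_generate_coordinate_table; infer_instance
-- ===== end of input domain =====

-- B replaces A's duplicated per-cell closed-form index arithmetic by one unified wiring-order pass:
-- consecutive LED indices are enumerated per line and the whole block reversed on flipped lines (objective: simpler).
-- The Python dict (unique keys (x,y)) is ported as PySem.Dict and returned as its items flattened to (x, y, led).

-- ===== PORT A =====
def generate_coordinate_table (width : Int) (height : Int) (serpentine : Bool) (vertical : Bool) : List (Int × Int × Int) :=
  let table : PySem.Dict (Int × Int) Int :=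
    if !vertical then
      -- for y in range(0, height): for x in range(0, width): branch, table[(x,y)] = …
      (PySem.List.pyRange 0 height 1).foldl (fun t y =>
        (PySem.List.pyRange 0 width 1).foldl (fun t x =>
          if !serpentine || (PySem.Int.mod y 2 == 0) then
            t.insert (x, y) (y * width + x)
          else
            t.insert (x, y) (y * width + (width - x - 1))) t) PySem.Dict.empty
    else
      -- for x in range(0, width): for y in range(0, height): branch, table[(x,y)] = …
      (PySem.List.pyRange 0 width 1).foldl (fun t x =>
        (PySem.List.pyRange 0 height 1).foldl (fun t y =>
          if !serpentine || (PySem.Int.mod x 2 == 0) then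
            t.insert (x, y) (x * height + y)
          else
            t.insert (x, y) (x * height + (height - y - 1))) t) PySem.Dict.empty
  table.items.map (fun p => (p.1.1, p.1.2, p.2))

-- ===== PORT B =====
def generate_coordinate_table_alt (width : Int) (height : Int) (serpentine : Bool) (vertical : Bool) : List (Int × Int × Int) :=
  let oi : Int × Int := if vertical then (width, height) else (height, width)
  let outer := oi.1
  let inner := oi.2
  -- state = (table, led); for o in range(outer): block = list(range(led, led+inner)); maybe reversed; assign
  let st : PySem.Dict (Int × Int) Int × Int :=
    (PySem.List.pyRange 0 outer 1).foldl (fun st o =>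
      let block0 := PySem.List.pyRange st.2 (st.2 + inner) 1
      let block := if serpentine && (PySem.Int.mod o 2 == 1) then block0.reverse else block0
      let table :=
        (PySem.List.pyRange 0 inner 1).foldl (fun t i =>
          -- block[i]: i ∈ range(inner) is always in range of block (length inner), so the total form is exact here
          t.insert (if vertical then (o, i) else (i, o)) (PySem.List.pyGetD block i 0)) st.1
      (table, st.2 + inner)) (PySem.Dict.empty, 0)
  st.1.items.map (fun p => (p.1.1, p.1.2, p.2))

-- ===== PRECONDITION & SPEC =====
def Spec_generate_coordinate_table (width : Int) (height : Int) (serpentine : Bool) (vertical : Bool) (out : List (Int × Int × Int)) : Prop := out = generate_coordinate_table_alt width height serpentine vertical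
instance (width : Int) (height : Int) (serpentine : Bool) (vertical : Bool) (out : List (Int × Int × Int)) : Decidable (Spec_generate_coordinate_table width height serpentine vertical out) := by unfold Spec_generate_coordinate_table; infer_instance

-- ===== CLAIM (what is proved, stated in full; the proofs are below) =====
def Claim_equal_generate_coordinate_table : Prop := ∀ (width : Int) (height : Int) (serpentine : Bool) (vertical : Bool), Dom_generate_coordinate_table width height serpentine vertical → Spec_generate_coordinate_table width height serpentine vertical (generate_coordinate_table width height serpentine vertical)

-- ===== LEMMAS AND PROOFS =====

-- an if around two inserts at the same key is an insert of an if (branch shape of A's inner loop)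
theorem pv_ite_insert {κ ν : Type} [BEq κ] (t : PySem.Dict κ ν) (c : Prop) [Decidable c] (k : κ) (v₁ v₂ : ν) :
    (if c then t.insert k v₁ else t.insert k v₂) = t.insert k (if c then v₁ else v₂) :=
  (apply_ite (t.insert k) c v₁ v₂).symm

-- generic nested-loop shape: outer fold over distinct lines, inner fold inserting a full line of fresh keys, appends line by line
theorem pv_fold_items (w : Int) (key : Int → Int → Int × Int) (val : Int → Int → Int)
    (hinj : ∀ o i i', key i o = key i' o → i = i')
    (hsep : ∀ o o' i i', key i o = key i' o' → o = o') :
    ∀ (l : List Int), l.Nodup →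
    ∀ (d : PySem.Dict (Int × Int) Int), d.keys.Nodup →
    (∀ o ∈ l, ∀ i, (key i o) ∉ d.keys) →
    (l.foldl (fun t o => (PySem.List.pyRange 0 w 1).foldl (fun t i => t.insert (key i o) (val i o)) t) d).items
      = d.items ++ l.flatMap (fun o => (PySem.List.pyRange 0 w 1).map (fun i => (key i o, val i o))) := by
  intro l
  induction l with
  | nil => intro _ d _ _; simp
  | cons o l ih =>
    intro hnd d hkeys hfresh
    have hrow : ((PySem.List.pyRange 0 w 1).foldl (fun t i => t.insert (key i o) (val i o)) d).items
        = d.items ++ (PySem.List.pyRange 0 w 1).map (fun i => (key i o, val i o)) := by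
      apply PySem.Dict.items_foldl_insert_fresh
      · intro i _
        rw [PySem.Dict.contains_eq_decide_mem_keys]
        simpa using hfresh o (by simp) i
      · exact (PySem.List.nodup_pyRange_one 0 w).map
          (fun i i' h => hinj o i i' h)
    have hkeys' : ((PySem.List.pyRange 0 w 1).foldl (fun t i => t.insert (key i o) (val i o)) d).keys
        = PySem.Set.update d.keys ((PySem.List.pyRange 0 w 1).map (fun i => key i o)) :=
      PySem.Dict.keys_foldl_insert_key _ _ (fun _ i => val i o) d
    simp only [List.foldl_cons]
    rw [ih (List.nodup_cons.mp hnd).2 _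
      (PySem.Dict.nodup_keys_foldl_insert_key _ _ _ d hkeys)
      (by
        intro o' ho' i hmem
        rw [hkeys'] at hmem
        rcases (PySem.Set.mem_update _ _ _).mp hmem with h | h
        · exact hfresh o' (by simp [ho']) i h
        · rcases List.mem_map.mp h with ⟨i', _, hkey⟩
          have heq : o = o' := hsep o o' i' i hkey
          exact (List.nodup_cons.mp hnd).1 (heq ▸ ho')),
      hrow, List.append_assoc, List.flatMap_cons]

-- B's running-led pair state: after n lines, led = inner * n and the dict fold sees led = inner * o at line o
theorem pv_led (inner : Int) (g : Int → Int → PySem.Dict (Int × Int) Int → PySem.Dict (Int × Int) Int) :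
    ∀ (n : Nat),
    (PySem.List.pyRange 0 n 1).foldl (fun st o => (g st.2 o st.1, st.2 + inner)) (PySem.Dict.empty, 0)
      = ((PySem.List.pyRange 0 n 1).foldl (fun t o => g (inner * o) o t) PySem.Dict.empty, inner * n) := by
  intro n
  induction n with
  | zero => simp [PySem.List.pyRange]
  | succ n ih =>
    have h : ((n : Int) + 1) = ((n + 1 : Nat) : Int) := by push_cast; ring
    rw [← h, PySem.List.pyRange_one_succ_right (by positivity), List.foldl_append, List.foldl_append, ih]
    simp only [List.foldl_cons, List.foldl_nil]
    rw [Prod.mk.injEq]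
    exact ⟨rfl, by ring⟩

-- per-cell value: indexing the (possibly reversed) consecutive block equals A's closed-form arithmetic
theorem pv_row_eq (w o : Int) (s : Bool) (ho : 0 ≤ o) :
    ∀ i ∈ PySem.List.pyRange 0 w 1,
      PySem.List.pyGetD (if s && (PySem.Int.mod o 2 == 1) then (PySem.List.pyRange (w*o) (w*o+w) 1).reverse else PySem.List.pyRange (w*o) (w*o+w) 1) i 0
        = if !s || (PySem.Int.mod o 2 == 0) then o*w + i else o*w + (w - i - 1) := by
  intro i hi
  obtain ⟨h0, h1⟩ := (PySem.List.mem_pyRange_one).mp hi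
  have hm0 : 0 ≤ PySem.Int.mod o 2 := PySem.Int.mod_nonneg o (by norm_num)
  have hm2 : PySem.Int.mod o 2 < 2 := PySem.Int.mod_lt o (by norm_num)
  have hlen : (PySem.List.pyRange (w*o) (w*o+w) 1).length = w.toNat := by
    rw [PySem.List.length_pyRange_one]; omega
  have hfwd : PySem.List.pyGetD (PySem.List.pyRange (w*o) (w*o+w) 1) i 0 = o*w + i := by
    rw [PySem.List.pyGetD_eq_getElem _ 0 h0 (by rw [hlen]; omega),
      PySem.List.getElem_pyRange_one, Int.toNat_of_nonneg h0, mul_comm]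
  have hrev : PySem.List.pyGetD ((PySem.List.pyRange (w*o) (w*o+w) 1).reverse) i 0 = o*w + (w - i - 1) := by
    rw [PySem.List.pyGetD_eq_getElem _ 0 h0 (by rw [List.length_reverse, hlen]; omega),
      List.getElem_reverse, PySem.List.getElem_pyRange_one]
    have : ((((PySem.List.pyRange (w*o) (w*o+w) 1).length - 1 - i.toNat : Nat)) : Int) = w - i - 1 := by
      rw [hlen]; omega
    rw [this]; ring
  cases s with
  | false => simpa using hfwd
  | true =>
    rcases (by omega : PySem.Int.mod o 2 = 0 ∨ PySem.Int.mod o 2 = 1) with hm | hm <;>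
      rw [hm] <;> simp [hfwd, hrev]

-- both ports build the same items list (shared by the horizontal and vertical cases, `key` abstracts the axis order)
theorem pv_main (inner bound : Int) (s : Bool) (key : Int → Int → Int × Int)
    (hinj : ∀ o i i', key i o = key i' o → i = i')
    (hsep : ∀ o o' i i', key i o = key i' o' → o = o') :
    ((PySem.List.pyRange 0 bound 1).foldl (fun t o => (PySem.List.pyRange 0 inner 1).foldl
        (fun t i => t.insert (key i o) (if !s || (PySem.Int.mod o 2 == 0) then o*inner + i else o*inner + (inner - i - 1))) t) PySem.Dict.empty).items
    = (((PySem.List.pyRange 0 bound 1).foldl (fun st o =>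
        ((PySem.List.pyRange 0 inner 1).foldl
          (fun t i => t.insert (key i o) (PySem.List.pyGetD (if s && (PySem.Int.mod o 2 == 1) then (PySem.List.pyRange st.2 (st.2 + inner) 1).reverse else PySem.List.pyRange st.2 (st.2 + inner) 1) i 0)) st.1, st.2 + inner))
        (PySem.Dict.empty, 0)).1).items := by
  by_cases hb : bound ≤ 0
  · have hnil : PySem.List.pyRange 0 bound 1 = [] :=
      List.eq_nil_of_length_eq_zero (by rw [PySem.List.length_pyRange_one]; omega)
    rw [hnil]; rfl
  · have hN : bound = ((bound.toNat : Nat) : Int) := (Int.toNat_of_nonneg (by omega)).symm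
    have hled := pv_led inner (fun led o t => (PySem.List.pyRange 0 inner 1).foldl
      (fun t i => t.insert (key i o) (PySem.List.pyGetD (if s && (PySem.Int.mod o 2 == 1) then (PySem.List.pyRange led (led + inner) 1).reverse else PySem.List.pyRange led (led + inner) 1) i 0)) t) bound.toNat
    rw [hN]
    simp only [hled]
    rw [pv_fold_items inner key _ hinj hsep _ (PySem.List.nodup_pyRange_one 0 _)
        PySem.Dict.empty (by simp [PySem.Dict.keys_empty]) (by simp [PySem.Dict.keys_empty]),
      pv_fold_items inner key _ hinj hsep _ (PySem.List.nodup_pyRange_one 0 _)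
        PySem.Dict.empty (by simp [PySem.Dict.keys_empty]) (by simp [PySem.Dict.keys_empty])]
    simp only [PySem.Dict.empty, List.nil_append]
    apply List.flatMap_congr
    intro o ho
    have ho0 : 0 ≤ o := ((PySem.List.mem_pyRange_one).mp ho).1
    apply List.map_congr_left
    intro i hi
    rw [pv_row_eq inner o s ho0 i hi]

-- ===== VERDICT (by name: the statement is the Claim_ definition above) =====
theorem generate_coordinate_table_spec : Claim_equal_generate_coordinate_table := by
  intro w h s v _
  unfold Spec_generate_coordinate_table generate_coordinate_table generate_coordinate_table_alt
  cases v with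
  | false =>
    simp only [Bool.not_false, if_true, Bool.false_eq_true, if_false, pv_ite_insert]
    exact congrArg _ (pv_main w h s (fun i o => (i, o))
      (fun o i i' hk => (Prod.ext_iff.mp hk).1) (fun o o' i i' hk => (Prod.ext_iff.mp hk).2))
  | true =>
    simp only [Bool.not_true, if_true, Bool.false_eq_true, if_false, pv_ite_insert]
    exact congrArg _ (pv_main h w s (fun i o => (o, i))
      (fun o i i' hk => (Prod.ext_iff.mp hk).2) (fun o o' i i' hk => (Prod.ext_iff.mp hk).1))
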